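/- GENERATED by mk_final_copies.py from the proof of the farm's unit `memcpy` (farm:memcpy.1: Proof.lean) as the
   re-elaboration sweep compiled it — do not edit. -/
import Asan.CheckWalk
import Vorbis.Spec.Units.memcpy

open X86 X86.User Asan Vorbis

set_option maxRecDepth 4000
set_option maxHeartbeats 4000000

namespace Vorbis.Spec.memcpy

/-- The byte that `movzx r12d, BYTE PTR [m]` loads and `mov [m8], r12b` stores again: a value below 256 survives the trip. -/
theorem byte_roundtrip (x : Nat) (hx : x < 256) :
    (BitVec.setWidth 8 (BitVec.zeroExtend 32 (BitVec.ofNat 8 x))).toNat = x := by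
  simp only [BitVec.toNat_setWidth, BitVec.truncate_eq_setWidth, BitVec.toNat_ofNat]
  omega

/-- Reading back the byte that the loop body has just stored at `a`: the byte `x` it loaded. -/
theorem readLE_copied_byte (M : Mem) (a : Word) (x : Nat) (hx : x < 256) :
    (M.writeLE a 1 (BitVec.setWidth 8 (BitVec.zeroExtend 32 (BitVec.ofNat 8 x))).toNat).readLE a 1 = x := by
  rw [Mem.readLE_writeLE_same _ _ _ _ (by decide), byte_roundtrip x hx, Nat.pow_one]
  exact Nat.mod_eq_of_lt hx

end Vorbis.Spec.memcpy

/-- `memcpy` satisfies its contract: six pushes, a loop (`u_loop` / `u_loop_back`) with two check calls, one byte load and one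
byte store inside, the pops and the `ret`. The loop invariant says which bytes of the destination are copied (`hfill`) and that
the source bytes still to be read are the original ones (`hsrc`: this is where the pre's "no harmful overlap" is used). -/
theorem Vorbis.Spec.Worked.memcpy_ok : Vorbis.Spec.memcpy.Statement := by
  intro Lay hLay μ hμ u₀ hcode hload1 hstore1 others frames u ret he hpre
  v_entry he
  obtain ⟨hsh, hlive⟩ := hpre
  -- where the source and the destination are: one arithmetic fact
  have hsp := hsh.rsp
  have hwhere : (u.reg .rdx).toNat = 0 ∨
      ((0x119d40 ≤ (u.reg .rsi).toNat ∧ (u.reg .rsi).toNat + (u.reg .rdx).toNat ≤ 0xC00000 ∧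
          ((u.reg .rsp).toNat + 8 ≤ (u.reg .rsi).toNat ∨ (u.reg .rsi).toNat + (u.reg .rdx).toNat ≤ 0x700000 ∨
            0x800000 ≤ (u.reg .rsi).toNat)) ∧
        (0x119d40 ≤ (u.reg .rdi).toNat ∧ (u.reg .rdi).toNat + (u.reg .rdx).toNat ≤ 0xC00000 ∧
          ((u.reg .rsp).toNat + 8 ≤ (u.reg .rdi).toNat ∨ (u.reg .rdi).toNat + (u.reg .rdx).toNat ≤ 0x700000 ∨
            0x800000 ≤ (u.reg .rdi).toNat))) := by
    rcases hlive with h0 | ⟨hls, hld, _⟩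
    · exact Or.inl h0
    · by_cases hn : (u.reg .rdx).toNat = 0
      · exact Or.inl hn
      · exact Or.inr ⟨hls.where_ hsh.inv hsh.offText (by omega), hld.where_ hsh.inv hsh.offText (by omega)⟩
  -- 0x101440 … 0x10145c, libc.c:7 and 11: the pushes, the arguments to r13 r15 r14, `i = 0`, the jump to the loop head
  u_walk hcode [hμ.vendor] until [Vorbis.L.memcpy.loop1] span [Vorbis.L.textLo, Vorbis.L.textHi] side (v_side)
  -- 0x101484, libc.c:11: the loop head. What varies is generalised, the exact memory is replaced by what stays true
  obtain ⟨i, hi, hile, hfill, hsrc⟩ : ∃ i : Nat, s_10145c.reg .rbx = UInt64.ofNat i ∧ i ≤ (u.reg .rdx).toNat ∧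
      (∀ j, j < i → s_10145c.mem.readLE (u.reg .rdi + UInt64.ofNat j) 1 = u.mem.readLE (u.reg .rsi + UInt64.ofNat j) 1) ∧
      (∀ j, i ≤ j → j < (u.reg .rdx).toNat →
        s_10145c.mem.readLE (u.reg .rsi + UInt64.ofNat j) 1 = u.mem.readLE (u.reg .rsi + UInt64.ofNat j) 1) := by
    refine ⟨0, w_rbx, Nat.zero_le _, fun j hj => absurd hj (Nat.not_lt_zero j), ?_⟩
    -- (the six pushes did not touch the source: it is off this function's stack)
    intro j _ hj
    obtain ⟨⟨hws1, hws2, hws3⟩, _⟩ := hwhere.resolve_left (by omega)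
    have : u.mem.readLE (u.reg .rsi + UInt64.ofNat j) 1 = u.mem.readLE (u.reg .rsi + UInt64.ofNat j) 1 := rfl
    u_frame this
  have hsame : Mem.SameExcept [⟨(u.reg .rsp).toNat - 80, (u.reg .rsp).toNat⟩,
      ⟨(u.reg .rdi).toNat, (u.reg .rdi).toNat + (u.reg .rdx).toNat⟩] u.mem s_10145c.mem := by
    u_same
  have hun : ShadowUntouched u.mem s_10145c.mem := by v_untouched
  have hs1 : UInt64.ofNat (s_10145c.mem.readLE (u.reg .rsp - 8) 8) = u.reg .r15 := by u_resolve
  have hs2 : UInt64.ofNat (s_10145c.mem.readLE (u.reg .rsp - 16) 8) = u.reg .r14 := by u_resolve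
  have hs3 : UInt64.ofNat (s_10145c.mem.readLE (u.reg .rsp - 24) 8) = u.reg .r13 := by u_resolve
  have hs4 : UInt64.ofNat (s_10145c.mem.readLE (u.reg .rsp - 32) 8) = u.reg .r12 := by u_resolve
  have hs5 : UInt64.ofNat (s_10145c.mem.readLE (u.reg .rsp - 40) 8) = u.reg .rbp := by u_resolve
  have hs6 : UInt64.ofNat (s_10145c.mem.readLE (u.reg .rsp - 48) 8) = u.reg .rbx := by u_resolve
  have hs0 : UInt64.ofNat (s_10145c.mem.readLE (u.reg .rsp) 8) = ret := by u_resolve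
  have hdf : s_10145c.flags .df = false := by
    rw [w_flags]
    simp only [X86.User.df_setStatus]
    exact he_df
  replace w_kept := w_kept.mono_all
    (S' := [.rbx, .r14, .r15, .r13, .rsp, .r12, .rbp, .rdi, .rax, .rdx]) (by rfl)
  clear w_mem w_flags w_rbx
  u_loop [i] (fun v => (u.reg .rdx).toNat - (v.reg .rbx).toNat)
  -- 0x101484 … 0x101480, libc.c:11-12: the test, then the body (to the back edge) or the exit (to the `ret`)
  u_walk hcode [hμ.vendor] until [Vorbis.L.memcpy.loop1] span [Vorbis.L.textLo, Vorbis.L.textHi] side (v_side)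
  · -- 0x10146a, libc.c:12: the check of the load `s[i]`: the byte is inside the source
    obtain ⟨hls, hld, hov⟩ := hlive.resolve_left (by u_omega)
    obtain ⟨⟨hws1, hws2, hws3⟩, hwd1, hwd2, hwd3⟩ := hwhere.resolve_left (by u_omega)
    clear hwhere hlive
    have hun' : ShadowUntouched u.mem s_10146a.mem := by v_untouched
    exact hls.accSmall hsh.inv hun' _ 1 (by decide) (by u_omega) (by u_omega)
  · -- 0x101477, libc.c:12: the check of the store `d[i]`: the byte is inside the destination
    obtain ⟨hls, hld, hov⟩ := hlive.resolve_left (by u_omega)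
    obtain ⟨⟨hws1, hws2, hws3⟩, hwd1, hwd2, hwd3⟩ := hwhere.resolve_left (by u_omega)
    clear hwhere hlive
    have hun' : ShadowUntouched u.mem s_101477.mem := by v_untouched
    exact hld.accSmall hsh.inv hun' _ 1 (by decide) (by u_omega) (by u_omega)
  · -- 0x101480 → 0x101484: the back edge
    obtain ⟨hls, hld, hov⟩ := hlive.resolve_left (by u_omega)
    obtain ⟨⟨hws1, hws2, hws3⟩, hwd1, hwd2, hwd3⟩ := hwhere.resolve_left (by u_omega)
    clear hwhere hlive
    u_loop_back [i + 1]
    · -- the counter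
      rw [w_rbx, UInt64.ofNat_add]
      rfl
    · u_omega
    · -- the bytes copied so far: the new one is the source byte, still the original one (`hsrc`)
      intro j hj
      by_cases hji : j = i
      · subst hji
        rw [w_mem, ← hsrc j (Nat.le_refl j) (by u_omega)]
        exact Vorbis.Spec.memcpy.readLE_copied_byte _ _ _ (Mem.readLE_lt _ _ 1)
      · have := hfill j (by omega)
        u_frame this
    · -- the source bytes still to be read: the store at `d + i` is below them (`d ≤ s`) or beyond the source (`s + n ≤ d`)
      intro j hj1 hj2
      have := hsrc j (by omega) hj2
      rcases hov with hov | hov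
      · u_frame this
      · u_frame this
    · -- still no store to the shadow
      v_untouched
    · -- the direction flag: the check kept it (`w_df_101477`), the `add` wrote status flags only
      rw [w_flags]
      simp only [X86.User.df_setStatus]
      assumption
    · -- the measure
      rw [w_rbx]
      u_omega
  · -- 0x101489 … 0x10149a, libc.c:15: the exit, walked to the `ret`: the contract's `Returned`
    have hn : (u.reg .rdx).toNat ≤ i := by u_omega
    clear hwhere hlive
    -- (DF and the MXCSR masks of the final state, stated last in the context: `v_returned`'s `assumption` finds them at once)
    have hdf' : s_10149a.flags .df = false := by
      rw [w_flags]
      simp only [X86.User.df_setStatus]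
      exact hdf
    have hmx' : s_10149a.mxcsr &&& 0x1F80 = 0x1F80 := by
      rw [w_mxcsr]
      exact he_mx
    refine ReachVia.done (Or.inl ?_)
    v_returned
    refine ⟨w_rax, ?_, ?_⟩
    · -- no store went to the shadow
      rw [w_mem]
      exact hun
    -- every byte of the destination is the original source byte: `i = n` at the exit
    intro j hj
    rw [w_mem]
    exact hfill j (by omega)
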